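-- pv_equiv track=rewrite | github.com/LeonYang95/AssertMate | as_gen_integration/scripts/bytecode_signature_retriever.py | to_jave_bytecode_types
-- ===== SOURCE A (Python) =====
-- def to_jave_bytecode_types(c_str: str):
--     # ["B", "C", "D", "F", "I", "J", "Z", "S"]
--     if c_str == "B":
--         return "java.lang.byte"
--     elif c_str == "C":
--         return "java.lang.character"
--     elif c_str == "D":
--         return "java.lang.double"
--     elif c_str == "F":
--         return "java.lang.float"
--     elif c_str == "I":
--         return "java.lang.integer"
--     elif c_str == "J":
--         return "java.lang.long"
--     elif c_str == "Z":
--         return "java.lang.boolean"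
--     elif c_str == "S":
--         return "java.lang.short"
--     elif c_str.startswith("L"):
--         return c_str[1:].replace("/", ".")
--     elif c_str.startswith("["):
--         return to_jave_bytecode_types(c_str[1:]) + "[]"
--     else:
--         raise NotImplementedError("class type %s not implemented yet" % c_str)
-- ===== SOURCE B (Python) =====
-- _PRIMS = {
--     "B": "java.lang.byte",
--     "C": "java.lang.character",
--     "D": "java.lang.double",
--     "F": "java.lang.float",
--     "I": "java.lang.integer",
--     "J": "java.lang.long",
--     "Z": "java.lang.boolean",
--     "S": "java.lang.short",
-- }
--
--
-- def to_jave_bytecode_types(c_str: str):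
--     base = c_str.lstrip("[")
--     dims = len(c_str) - len(base)
--     if base in _PRIMS:
--         res = _PRIMS[base]
--     elif base.startswith("L"):
--         res = base[1:].replace("/", ".")
--     else:
--         raise NotImplementedError("class type %s not implemented yet" % base)
--     return res + "[]" * dims
-- ===== Notes on version B (the rewrite author's own statement) =====
-- stated objective: simpler
-- what changed: Replaces A's recursion over array dimensions (one recursive call and slice per leading bracket) and its 8-way if/elif primitive chain by a single lstrip of the leading brackets, a dict lookup for the 8 primitive descriptors, and appending one bracket pair per stripped dimension.
import Mathlib
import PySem

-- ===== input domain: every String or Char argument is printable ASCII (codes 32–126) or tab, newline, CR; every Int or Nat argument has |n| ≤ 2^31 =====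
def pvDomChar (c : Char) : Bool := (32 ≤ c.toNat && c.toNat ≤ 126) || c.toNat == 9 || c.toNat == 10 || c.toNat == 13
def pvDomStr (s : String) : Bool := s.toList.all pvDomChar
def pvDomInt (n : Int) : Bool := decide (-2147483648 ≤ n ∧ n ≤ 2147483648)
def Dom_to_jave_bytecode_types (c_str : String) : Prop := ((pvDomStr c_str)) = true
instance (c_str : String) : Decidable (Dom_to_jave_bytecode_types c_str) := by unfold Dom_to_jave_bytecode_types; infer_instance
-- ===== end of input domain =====

-- B replaces A's recursion over array dimensions by one lstrip of the leading '['s plus a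
-- dict lookup for the 8 primitive descriptors (objective: simpler decomposition, same cost).

-- ===== PORT A =====
-- core of A on code points (strings handled via PySem.Chars on List Char)
def pvAcore (s : List Char) : List Char :=
  if s = ['B'] then "java.lang.byte".toList
  else if s = ['C'] then "java.lang.character".toList
  else if s = ['D'] then "java.lang.double".toList
  else if s = ['F'] then "java.lang.float".toList
  else if s = ['I'] then "java.lang.integer".toList
  else if s = ['J'] then "java.lang.long".toList
  else if s = ['Z'] then "java.lang.boolean".toList
  else if s = ['S'] then "java.lang.short".toList
  else if PySem.Chars.startswith s ['L'] then
    PySem.Chars.replace (PySem.List.slice s (some 1) none) ['/'] ['.']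
  else if h : PySem.Chars.startswith s ['['] then
    pvAcore (PySem.List.slice s (some 1) none) ++ "[]".toList
  else []  -- Python raises NotImplementedError here; excluded by Pre_
termination_by s.length
decreasing_by
  rw [PySem.Chars.startswith_iff] at h
  rcases h with ⟨t, rfl⟩
  simp [PySem.List.slice_from_one]

def to_jave_bytecode_types (c_str : String) : String := String.ofList (pvAcore c_str.toList)

-- ===== PORT B =====
def pvPrims : PySem.Dict (List Char) (List Char) :=
  PySem.Dict.ofList
    [ (['B'], "java.lang.byte".toList), (['C'], "java.lang.character".toList),
      (['D'], "java.lang.double".toList), (['F'], "java.lang.float".toList),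
      (['I'], "java.lang.integer".toList), (['J'], "java.lang.long".toList),
      (['Z'], "java.lang.boolean".toList), (['S'], "java.lang.short".toList) ]

-- core of B; c_str.lstrip("[") is ported by hand as dropWhile (exact: drops leading chars of the set),
-- "[]" * dims as flatten of replicate (exact for the nonnegative dims)
def pvBcore (s : List Char) : List Char :=
  let base := s.dropWhile (fun c => c ∈ ['['])
  let dims := s.length - base.length
  let res :=
    match pvPrims.get? base with
    | some r => r
    | none =>
      if PySem.Chars.startswith base ['L'] then
        PySem.Chars.replace (PySem.List.slice base (some 1) none) ['/'] ['.']
      else []  -- Python raises NotImplementedError here; excluded by Pre_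
  res ++ (List.replicate dims "[]".toList).flatten

def to_jave_bytecode_types_alt (c_str : String) : String := String.ofList (pvBcore c_str.toList)

-- ===== PRECONDITION & SPEC =====
-- Pre_ excludes exactly the inputs on which A raises NotImplementedError: after stripping the
-- leading array brackets, the base must be one of the 8 primitive descriptors or be an object descriptor (leading marker letter ell).
def Pre_to_jave_bytecode_types (c_str : String) : Prop :=
  (c_str.toList.dropWhile (fun c => c ∈ ['['])) ∈
      [['B'], ['C'], ['D'], ['F'], ['I'], ['J'], ['Z'], ['S']]
    ∨ ['L'] <+: c_str.toList.dropWhile (fun c => c ∈ ['['])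
instance (c_str : String) : Decidable (Pre_to_jave_bytecode_types c_str) := by
  unfold Pre_to_jave_bytecode_types; infer_instance

def pvWitness_to_jave_bytecode_types : String := "[Lfoo/bar"

def Spec_to_jave_bytecode_types (c_str : String) (out : String) : Prop := out = to_jave_bytecode_types_alt c_str
instance (c_str : String) (out : String) : Decidable (Spec_to_jave_bytecode_types c_str out) := by unfold Spec_to_jave_bytecode_types; infer_instance

-- ===== CLAIM (what is proved, stated in full; the proofs are below) =====
def Claim_equal_to_jave_bytecode_types : Prop := ∀ (c_str : String), Dom_to_jave_bytecode_types c_str → Pre_to_jave_bytecode_types c_str → Spec_to_jave_bytecode_types c_str (to_jave_bytecode_types c_str)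

-- ===== LEMMAS AND PROOFS =====

def pvPreL (s : List Char) : Prop :=
  (s.dropWhile (fun c => c ∈ ['['])) ∈
      [['B'], ['C'], ['D'], ['F'], ['I'], ['J'], ['Z'], ['S']]
    ∨ ['L'] <+: s.dropWhile (fun c => c ∈ ['['])

lemma pvCore_eq : ∀ s : List Char, pvPreL s → pvAcore s = pvBcore s := by
  intro s
  induction s with
  | nil => intro h; rcases h with h | h <;> simp [List.dropWhile] at h
  | cons c t ih =>
    intro h
    by_cases hc : c = '['
    · subst hc
      have hdropc : ('[' :: t).dropWhile (fun c => c ∈ ['[']) = t.dropWhile (fun c => c ∈ ['[']) := by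
        simp
      have hpre : pvPreL t := by
        rcases h with h | h <;> [left; right] <;> rwa [hdropc] at h
      have hA : pvAcore ('[' :: t) = pvAcore t ++ "[]".toList := by
        rw [pvAcore]
        simp [PySem.Chars.startswith, PySem.List.slice_from_one]
      have hlen : (t.dropWhile (fun c => c ∈ ['['])).length ≤ t.length :=
        List.length_dropWhile_le _ _
      have hB : pvBcore ('[' :: t) = pvBcore t ++ "[]".toList := by
        simp only [pvBcore]
        rw [hdropc]
        simp only [List.length_cons]
        have harith : t.length + 1 - (t.dropWhile (fun c => c ∈ ['['])).length
             = (t.length - (t.dropWhile (fun c => c ∈ ['['])).length) + 1 := by omega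
        rw [harith, List.replicate_succ', List.flatten_append]
        simp [List.append_assoc]
      rw [hA, hB, ih hpre]
    · -- head is not '[': base = s itself, dims = 0
      have hdrop : (c :: t).dropWhile (fun c => c ∈ ['[']) = c :: t := by
        simp [hc]
      rcases h with h | h
      · rw [hdrop] at h
        fin_cases h <;> (rw [pvAcore]; decide)
      · rw [hdrop] at h
        obtain ⟨r, hr⟩ := h
        have hr' : 'L' :: r = c :: t := hr
        injection hr' with h1 h2
        subst h2
        have hcL : c = 'L' := h1.symm
        subst hcL
        rw [pvAcore]
        simp only [pvBcore]
        rw [hdrop]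
        have hget : pvPrims.get? ('L' :: r) = none := by
          have hmk : pvPrims = PySem.Dict.mk
            [ (['B'], "java.lang.byte".toList), (['C'], "java.lang.character".toList),
              (['D'], "java.lang.double".toList), (['F'], "java.lang.float".toList),
              (['I'], "java.lang.integer".toList), (['J'], "java.lang.long".toList),
              (['Z'], "java.lang.boolean".toList), (['S'], "java.lang.short".toList) ] := by decide
          rw [hmk]
          simp [PySem.Dict.get?, List.cons_beq_cons]
        rw [hget]
        simp [PySem.Chars.startswith]

-- ===== VERDICT (by name: the statement is the Claim_ definition above) =====
theorem to_jave_bytecode_types_spec : Claim_equal_to_jave_bytecode_types := by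
  intro c_str _ hpre
  unfold Spec_to_jave_bytecode_types to_jave_bytecode_types to_jave_bytecode_types_alt
  rw [pvCore_eq c_str.toList hpre]
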